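-- pv_equiv track=rewrite | github.com/chbtt/adventofcode-2020 | day18/day18_p2.py | preprocessClosure
-- ===== SOURCE A (Python) =====
-- def getInnerClosureEnd(substr: str, startIndex: int) -> int:
--     index = startIndex
--     closureCount = 1
--
--     while closureCount > 0:
--         index += 1
--
--         if substr[index] == "(":
--             closureCount += 1
--
--         if substr[index] == ")":
--             closureCount -= 1
--
--     return index
--
-- def preprocessClosure(substr: str) -> str:
--     index = 0
--     substrWithoutClosures = ""
--     while index < len(substr):
--         if substr[index] == "(":
--             stopIndex = getInnerClosureEnd(substr, index)
--             padding = " " * (stopIndex - index + 1)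
--             substrWithoutClosures += padding
--             index = stopIndex
--         else:
--             substrWithoutClosures += substr[index]
--
--         index += 1
--
--     # no more inner closures needed
--     if substrWithoutClosures.find("*", 0) == -1:
--         return substr
--
--     # at least one inner closure needed
--     index = 0
--     preprocessedClosure = "("
--     while (mulIndex := substrWithoutClosures.find("*", index)) != -1:
--         preprocessedClosure += substr[index:mulIndex]
--         preprocessedClosure += ")*("
--         index = mulIndex + 1
--
--     preprocessedClosure += substr[index:] + ")"
--
--     return preprocessedClosure
-- ===== SOURCE B (Python) =====
-- def preprocessClosure(substr: str) -> str:
--     segments = []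
--     current = []
--     depth = 0
--     for ch in substr:
--         if ch == "*" and depth == 0:
--             segments.append("".join(current))
--             current = []
--             continue
--         if ch == "(":
--             depth += 1
--         elif ch == ")" and depth > 0:
--             depth -= 1
--         current.append(ch)
--     segments.append("".join(current))
--     if len(segments) == 1:
--         return substr
--     return "(" + ")*(".join(segments) + ")"
-- ===== Notes on version B (the rewrite author's own statement) =====
-- stated objective: faster
-- what changed: Replaces A's two-phase approach (build a space-masked copy of the string via an index-jumping inner-closure scanner with repeated string concatenation, then repeatedly str.find a multiplication sign in the mask and slice the original) by a single linear pass that keeps an integer paren depth, splits the string into segments at depth-zero multiplication signs, and joins the segments inside outer parentheses.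
-- outside the precondition, e.g. on preprocessClosure('('): A raises IndexError, B returns '('
import Mathlib
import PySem

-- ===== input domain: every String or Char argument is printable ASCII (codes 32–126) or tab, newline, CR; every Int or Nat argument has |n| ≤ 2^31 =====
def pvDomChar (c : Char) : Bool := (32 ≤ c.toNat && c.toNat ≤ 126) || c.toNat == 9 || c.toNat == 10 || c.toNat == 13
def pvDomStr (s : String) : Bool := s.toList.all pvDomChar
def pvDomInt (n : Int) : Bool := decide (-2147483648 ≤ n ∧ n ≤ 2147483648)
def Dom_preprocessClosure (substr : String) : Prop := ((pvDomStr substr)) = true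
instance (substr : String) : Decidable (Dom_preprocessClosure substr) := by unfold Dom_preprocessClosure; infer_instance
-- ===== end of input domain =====

-- B replaces A's two-phase mask-then-find structure by one depth-counting pass that
-- splits the string at top-level '*' and joins the segments (objective: simpler).

-- ===== PORT A =====
-- inner while loop of getInnerClosureEnd; fuel-driven; when Python would raise
-- IndexError (index past the end, pyGet? = none) we return the current index — such
-- inputs are excluded by Pre_preprocessClosure.
def gICEloop (s : List Char) (index count : Int) : Nat → Int
  | 0 => index
  | Nat.succ f =>
    if count > 0 then
      let index' := index + 1
      match PySem.List.pyGet? s index' with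
      | none => index'  -- IndexError in Python; outside Pre_
      | some ch =>
        let c1 := if ch = '(' then count + 1 else count
        let c2 := if ch = ')' then c1 - 1 else c1
        gICEloop s index' c2 f
    else index

def getInnerClosureEnd (s : List Char) (startIndex : Int) : Int :=
  gICEloop s startIndex 1 (s.length + 1)

-- first while loop of preprocessClosure: builds substrWithoutClosures
def maskLoop (s : List Char) (index : Int) (acc : List Char) : Nat → List Char
  | 0 => acc
  | Nat.succ f =>
    if index < (s.length : Int) then
      match PySem.List.pyGet? s index with
      | none => acc  -- unreachable: 0 ≤ index < len
      | some ch =>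
        if ch = '(' then
          let stopIndex := getInnerClosureEnd s index
          let acc' := acc ++ List.replicate (stopIndex - index + 1).toNat ' '
          maskLoop s (stopIndex + 1) acc' f
        else
          maskLoop s (index + 1) (acc ++ [ch]) f
    else acc

-- second while loop: while (mulIndex := mask.find('*', index)) != -1 …, then the
-- final 'preprocessedClosure += substr[index:] + ")"' in the else branch
def buildLoop (s masked : List Char) (index : Int) (acc : List Char) : Nat → List Char
  | 0 => acc
  | Nat.succ f =>
    let mulIndex := PySem.Chars.findFrom masked ['*'] index
    if mulIndex ≠ -1 then
      buildLoop s masked (mulIndex + 1)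
        (acc ++ PySem.List.slice s (some index) (some mulIndex) ++ [')', '*', '(']) f
    else acc ++ PySem.List.slice s (some index) none ++ [')']

def preprocessClosure (substr : String) : String :=
  let s := substr.toList
  let substrWithoutClosures := maskLoop s 0 [] (s.length + 1)
  if PySem.Chars.findFrom substrWithoutClosures ['*'] 0 = -1 then substr
  else String.ofList (buildLoop s substrWithoutClosures 0 ['('] (s.length + 2))

-- ===== PORT B =====
-- one pass: split into top-level segments at '*' seen at paren depth 0
def segLoop (cs : List Char) (depth : Nat) (cur : List Char) (acc : List (List Char)) :
    List (List Char) :=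
  match cs with
  | [] => acc ++ [cur]
  | c :: rest =>
    if c = '*' ∧ depth = 0 then segLoop rest 0 [] (acc ++ [cur])
    else segLoop rest (if c = '(' then depth + 1 else if c = ')' then depth - 1 else depth)
           (cur ++ [c]) acc

def preprocessClosure_alt (substr : String) : String :=
  let segments := segLoop substr.toList 0 [] []
  if segments.length = 1 then substr
  else String.ofList ('(' :: PySem.Chars.join [')', '*', '('] segments ++ [')'])

-- ===== PRECONDITION & SPEC =====
-- paren-depth step, clamped at 0 (a stray top-level ')' is an ordinary character)
def clampStep (d : Nat) (c : Char) : Nat :=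
  if c = '(' then d + 1 else if c = ')' then d - 1 else d

-- Pre_ excludes exactly the strings with an unmatched '(': there Python's A raises
-- IndexError (getInnerClosureEnd runs past the end of the string).
def Pre_preprocessClosure (substr : String) : Prop :=
  substr.toList.foldl clampStep 0 = 0

instance (substr : String) : Decidable (Pre_preprocessClosure substr) := by
  unfold Pre_preprocessClosure; infer_instance

def pvWitness_preprocessClosure : String := "2*(3+4)*5"

def Spec_preprocessClosure (substr : String) (out : String) : Prop :=
  out = preprocessClosure_alt substr
instance (substr : String) (out : String) : Decidable (Spec_preprocessClosure substr out) := by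
  unfold Spec_preprocessClosure; infer_instance

-- ===== CLAIM (what is proved, stated in full; the proofs are below) =====
def Claim_equal_preprocessClosure : Prop := ∀ (substr : String), Dom_preprocessClosure substr → Pre_preprocessClosure substr → Spec_preprocessClosure substr (preprocessClosure substr)

-- ===== LEMMAS AND PROOFS =====

-- offset (within cs) of the char at which the closure count, started at c, reaches 0
def closeIdx? : Nat → List Char → Option Nat
  | _, [] => none
  | c, x :: xs =>
    if clampStep c x = 0 then some 0 else (closeIdx? (clampStep c x) xs).map (· + 1)

-- structural version of B's segLoop (no accumulators)
def consHead (p : List Char) : List (List Char) → List (List Char)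
  | [] => [p]
  | x :: xs => (p ++ x) :: xs

def segsR : List Char → Nat → List (List Char)
  | [], _ => [[]]
  | c :: cs, d =>
    if c = '*' ∧ d = 0 then [] :: segsR cs 0
    else consHead [c] (segsR cs (clampStep d c))

-- group-jumping segmentation (same recursion shape as A's mask pass)
def segsG : List Char → List (List Char)
  | [] => [[]]
  | c :: cs =>
    if c = '*' then [] :: segsG cs
    else if c = '(' then
      match closeIdx? 1 cs with
      | some k => consHead ('(' :: cs.take (k + 1)) (segsG (cs.drop (k + 1)))
      | none => [('(' :: cs)]
    else consHead [c] (segsG cs)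
termination_by cs => cs.length
decreasing_by all_goals simp [List.length_drop]

-- structural version of A's masked string
def maskT : List Char → List Char
  | [] => []
  | c :: cs =>
    if c = '(' then
      match closeIdx? 1 cs with
      | some k => List.replicate (k + 2) ' ' ++ maskT (cs.drop (k + 1))
      | none => List.replicate (cs.length + 2) ' '   -- A raises here; outside Pre_
    else c :: maskT cs
termination_by cs => cs.length
decreasing_by all_goals simp [List.length_drop]

-- structural version of A's second phase: walk mask and original in lockstep
def tailBuild : List Char → List Char → List Char
  | [], t => t ++ [')']
  | c :: m, t =>
    if c = '*' then ')' :: '*' :: '(' :: tailBuild m (t.drop 1)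
    else t.take 1 ++ tailBuild m (t.drop 1)

-- offset of the first '*'
def starIdx? : List Char → Option Nat
  | [] => none
  | c :: m => if c = '*' then some 0 else (starIdx? m).map (· + 1)

theorem go_star (m : List Char) (k : Nat) :
    PySem.Chars.find.go ['*'] m k =
      match starIdx? m with | none => -1 | some j => ((k + j : Nat) : Int) := by
  induction m generalizing k with
  | nil => simp [PySem.Chars.find.go, starIdx?]
  | cons c m ih =>
    rw [PySem.Chars.find.go]
    by_cases hc : c = '*'
    · subst hc; simp [starIdx?, List.isPrefixOf]
    · have hpre : List.isPrefixOf ['*'] (c :: m) = false := by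
        simp [List.isPrefixOf]; intro h; exact absurd h.symm hc
      rw [hpre]
      simp only [starIdx?, if_neg hc, ih]
      cases starIdx? m
      · simp
      · simp; ring

theorem find_star (m : List Char) :
    PySem.Chars.find m ['*'] =
      match starIdx? m with | none => -1 | some j => (j : Int) := by
  rw [PySem.Chars.find, go_star]; cases starIdx? m <;> simp

theorem starIdx?_some (m : List Char) (j : Nat) (h : starIdx? m = some j) :
    j < m.length ∧ '*' ∉ m.take j ∧ m.drop j = '*' :: m.drop (j+1) := by
  induction m generalizing j with
  | nil => simp [starIdx?] at h
  | cons c m ih =>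
    by_cases hc : c = '*'
    · subst hc; simp [starIdx?] at h; subst h; simp
    · simp [starIdx?, hc] at h
      obtain ⟨j', hj', rfl⟩ := h
      obtain ⟨h1, h2, h3⟩ := ih j' hj'
      refine ⟨by simpa using h1, ?_, by simpa using h3⟩
      simp [List.take_succ_cons]
      exact ⟨fun h => hc h.symm, h2⟩

theorem starIdx?_none (m : List Char) (h : starIdx? m = none) : '*' ∉ m := by
  induction m with
  | nil => simp
  | cons c m ih =>
    by_cases hc : c = '*'
    · subst hc; simp [starIdx?] at h
    · simp [starIdx?, hc] at h
      simp [Ne.symm hc, ih h]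

theorem consHead_ne_nil (p : List Char) (l : List (List Char)) : consHead p l ≠ [] := by
  cases l <;> simp [consHead]

theorem segsG_ne_nil (cs : List Char) : segsG cs ≠ [] := by
  match cs with
  | [] => simp [segsG]
  | c :: cs =>
    rw [segsG]
    by_cases h1 : c = '*'
    · simp [h1]
    · by_cases h2 : c = '('
      · simp only [h1, h2, if_true, if_false]
        cases closeIdx? 1 cs <;> simp [consHead_ne_nil]
      · simp [h1, h2, consHead_ne_nil]

theorem consHead_consHead (p q : List Char) (l : List (List Char)) :
    consHead p (consHead q l) = consHead (p ++ q) l := by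
  cases l <;> simp [consHead]

theorem segsR_ne_nil (cs : List Char) (d : Nat) : segsR cs d ≠ [] := by
  cases cs with
  | nil => simp [segsR]
  | cons c cs =>
    rw [segsR]
    split
    · simp
    · exact consHead_ne_nil _ _

theorem closeIdx?_lt (c : Nat) (cs : List Char) (k : Nat) (h : closeIdx? c cs = some k) :
    k < cs.length := by
  induction cs generalizing c k with
  | nil => simp [closeIdx?] at h
  | cons x xs ih =>
    rw [closeIdx?] at h
    by_cases h0 : clampStep c x = 0
    · simp [h0] at h; simp; omega
    · simp [h0] at h
      obtain ⟨k', hk', rfl⟩ := h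
      have := ih _ _ hk'
      simp; omega

theorem closeIdx?_bal (d : Nat) (cs : List Char) (k : Nat) (hd : 1 ≤ d)
    (h : closeIdx? d cs = some k) :
    cs.foldl clampStep d = (cs.drop (k+1)).foldl clampStep 0 := by
  induction cs generalizing d k with
  | nil => simp [closeIdx?] at h
  | cons x xs ih =>
    rw [closeIdx?] at h
    by_cases h0 : clampStep d x = 0
    · simp [h0] at h
      subst h
      simp [List.foldl_cons, h0]
    · simp [h0] at h
      obtain ⟨k', hk', rfl⟩ := h
      have := ih _ _ (by omega) hk'
      simpa [List.foldl_cons] using this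

theorem closeIdx?_none_pos (d : Nat) (cs : List Char) (hd : 1 ≤ d)
    (h : closeIdx? d cs = none) : 1 ≤ cs.foldl clampStep d := by
  induction cs generalizing d with
  | nil => simpa using hd
  | cons x xs ih =>
    rw [closeIdx?] at h
    by_cases h0 : clampStep d x = 0
    · simp [h0] at h
    · simp [h0] at h
      have := ih _ (by omega) h
      simpa [List.foldl_cons] using this

theorem segsR_close (d : Nat) (cs : List Char) (k : Nat) (hd : 1 ≤ d)
    (h : closeIdx? d cs = some k) :
    segsR cs d = consHead (cs.take (k+1)) (segsR (cs.drop (k+1)) 0) := by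
  induction cs generalizing d k with
  | nil => simp [closeIdx?] at h
  | cons x xs ih =>
    have hne : ¬ (x = '*' ∧ d = 0) := fun ⟨_, h0⟩ => by omega
    rw [closeIdx?] at h
    rw [segsR, if_neg hne]
    by_cases h0 : clampStep d x = 0
    · simp [h0] at h
      subst h
      simp [h0]
    · simp [h0] at h
      obtain ⟨k', hk', rfl⟩ := h
      rw [ih _ _ (by omega) hk', consHead_consHead]
      simp

theorem segsR_none (d : Nat) (cs : List Char) (hd : 1 ≤ d)
    (h : closeIdx? d cs = none) : segsR cs d = [cs] := by
  induction cs generalizing d with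
  | nil => simp [segsR]
  | cons x xs ih =>
    rw [closeIdx?] at h
    have hne : ¬ (x = '*' ∧ d = 0) := fun ⟨_, h0⟩ => by omega
    by_cases h0 : clampStep d x = 0
    · simp [h0] at h
    · simp [h0] at h
      rw [segsR, if_neg hne, ih _ (by omega) h]
      simp [consHead]

theorem segsR_eq_segsG (cs : List Char) : segsR cs 0 = segsG cs := by
  induction cs using segsG.induct with
  | case1 => simp [segsR, segsG]
  | case2 cs ih =>
    rw [segsR, if_pos ⟨rfl, rfl⟩, segsG, if_pos rfl, ih]
  | case3 cs k hk hne ih =>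
    rw [segsR, if_neg (by simp)]
    rw [segsG, if_neg (by simp), if_pos rfl, hk]
    have h1 : clampStep 0 '(' = 1 := rfl
    rw [h1, segsR_close 1 cs k le_rfl hk, consHead_consHead, ih]
    simp
  | case4 cs hk hne =>
    rw [segsR, if_neg (by simp)]
    rw [segsG, if_neg (by simp), if_pos rfl, hk]
    have h1 : clampStep 0 '(' = 1 := rfl
    rw [h1, segsR_none 1 cs le_rfl hk]
    simp [consHead]
  | case5 c cs h1 h2 ih =>
    rw [segsR, if_neg (by simp [h1])]
    rw [segsG, if_neg (by simpa using h1), if_neg (by simpa using h2)]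
    have h3 : clampStep 0 c = 0 := by simp [clampStep, h2]
    rw [h3, ih]

theorem consHead_nil_of_ne (l : List (List Char)) (h : l ≠ []) : consHead [] l = l := by
  cases l with
  | nil => exact absurd rfl h
  | cons x xs => simp [consHead]

theorem segLoop_eq (cs : List Char) (d : Nat) (cur : List Char) (acc : List (List Char)) :
    segLoop cs d cur acc = acc ++ consHead cur (segsR cs d) := by
  induction cs generalizing d cur acc with
  | nil => simp [segLoop, segsR, consHead]
  | cons c rest ih =>
    rw [segLoop, segsR]
    by_cases hc : c = '*' ∧ d = 0
    · rw [if_pos hc, if_pos hc, ih]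
      rw [consHead_nil_of_ne _ (segsR_ne_nil _ _)]
      cases hsr : segsR rest 0 with
      | nil => exact absurd hsr (segsR_ne_nil _ _)
      | cons x xs => simp [consHead]
    · rw [if_neg hc, if_neg hc, ih, consHead_consHead]
      rfl

-- A's inner scanner finds the closing offset
theorem gICEloop_eq (s : List Char) (i c k : Nat) (fuel : Nat) (hc : 1 ≤ c)
    (h : closeIdx? c (s.drop (i+1)) = some k) (hf : k + 2 ≤ fuel) :
    gICEloop s (i : Int) (c : Int) fuel = ((i + k + 1 : Nat) : Int) := by
  induction fuel generalizing i c k with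
  | zero => omega
  | succ f ih =>
    rw [gICEloop]
    rw [if_pos (by exact_mod_cast Nat.lt_of_lt_of_le Nat.zero_lt_one hc)]
    obtain ⟨x, xs, hm⟩ : ∃ x xs, s.drop (i+1) = x :: xs := by
      cases hm : s.drop (i+1) with
      | nil => rw [hm] at h; simp [closeIdx?] at h
      | cons x xs => exact ⟨x, xs, rfl⟩
    have hget : PySem.List.pyGet? s ((i : Int) + 1) = some x := by
      have : ((i : Int) + 1) = ((i + 1 : Nat) : Int) := by push_cast; ring
      rw [this, PySem.List.pyGet?_natCast, ← List.head?_drop, hm]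
      rfl
    simp only [hget]
    have hcount : (if x = ')' then (if x = '(' then (c:Int) + 1 else (c:Int)) - 1
        else (if x = '(' then (c:Int) + 1 else (c:Int))) = ((clampStep c x : Nat) : Int) := by
      by_cases h1 : x = '('
      · simp [h1, clampStep]
      · by_cases h2 : x = ')'
        · simp [h1, h2, clampStep]; omega
        · simp [h1, h2, clampStep]
    rw [hm, closeIdx?] at h
    by_cases h0 : clampStep c x = 0
    · simp [h0] at h
      subst h
      rw [hcount, h0]
      cases f with
      | zero => omega
      | succ f' =>
        rw [gICEloop, if_neg (by simp)]
        push_cast; ring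
    · simp [h0] at h
      obtain ⟨k', hk', rfl⟩ := h
      rw [hcount]
      have hds : s.drop (i+1+1) = xs := by
        have h2 := congrArg (List.drop 1) hm
        rw [List.drop_drop] at h2
        simpa using h2
      have : (i : Int) + 1 = ((i + 1 : Nat) : Int) := by push_cast; ring
      rw [this, ih (i+1) (clampStep c x) k' (by omega) (by rw [hds]; exact hk') (by omega)]
      congr 1
      omega

-- A's first loop builds maskT
theorem maskLoop_eq (fuel : Nat) (s : List Char) (i : Nat) (acc : List Char)
    (hbal : (s.drop i).foldl clampStep 0 = 0) (hf : (s.drop i).length + 1 ≤ fuel) :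
    maskLoop s (i : Int) acc fuel = acc ++ maskT (s.drop i) := by
  induction fuel generalizing i acc with
  | zero => simp at hf
  | succ f ih =>
    rw [maskLoop]
    by_cases hi : i < s.length
    · rw [if_pos (by exact_mod_cast hi)]
      obtain ⟨x, xs, hm⟩ : ∃ x xs, s.drop i = x :: xs := by
        cases hm : s.drop i with
        | nil => have := List.drop_eq_nil_iff.mp hm; omega
        | cons x xs => exact ⟨x, xs, rfl⟩
      have hget : PySem.List.pyGet? s (i : Int) = some x := by
        rw [PySem.List.pyGet?_natCast, ← List.head?_drop, hm]; rfl
      rw [hget]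
      simp only
      have hxs : s.drop (i+1) = xs := by
        have h2 := congrArg (List.drop 1) hm
        rw [List.drop_drop] at h2
        simpa using h2
      have hdl : (s.drop i).length = s.length - i := by simp
      by_cases hx : x = '('
      · subst hx
        rw [if_pos rfl]
        have hbal' : List.foldl clampStep 1 xs = 0 := by
          rw [hm] at hbal
          simpa [List.foldl_cons, clampStep] using hbal
        obtain ⟨k, hk⟩ : ∃ k, closeIdx? 1 xs = some k := by
          cases hck : closeIdx? 1 xs with
          | none => have := closeIdx?_none_pos 1 xs le_rfl hck; omega
          | some k => exact ⟨k, rfl⟩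
        have hklt := closeIdx?_lt 1 xs k hk
        have hxslen : xs.length = s.length - (i+1) := by
          have h2 := congrArg List.length hxs; simp at h2; omega
        have hstop : getInnerClosureEnd s (i : Int) = ((i + k + 1 : Nat) : Int) := by
          rw [getInnerClosureEnd]
          exact gICEloop_eq s i 1 k _ le_rfl (by rw [hxs]; exact hk) (by omega)
        rw [hstop]
        have hpad : (((i + k + 1 : Nat) : Int) - (i : Int) + 1).toNat = k + 2 := by
          push_cast; omega
        rw [hpad]
        have hnext : ((i + k + 1 : Nat) : Int) + 1 = ((i + k + 2 : Nat) : Int) := by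
          push_cast; ring
        rw [hnext]
        have hdd : s.drop (i + k + 2) = xs.drop (k+1) := by
          have h2 := congrArg (List.drop (k+1)) hxs
          rw [List.drop_drop] at h2
          rw [← h2]
          congr 1
          omega
        rw [ih (i + k + 2) _ (by rw [hdd, ← closeIdx?_bal 1 xs k le_rfl hk]; exact hbal')
              (by rw [hdd]; simp; omega)]
        rw [hm, maskT, if_pos rfl, hk, hdd]
        simp
      · rw [if_neg hx]
        have : (i : Int) + 1 = ((i + 1 : Nat) : Int) := by push_cast; ring
        rw [this]
        have hbal' : List.foldl clampStep 0 xs = 0 := by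
          rw [hm] at hbal
          simpa [List.foldl_cons, clampStep, hx] using hbal
        rw [ih (i+1) _ (by rw [hxs]; exact hbal') (by rw [hxs]; rw [hm] at hf; simp at hf ⊢; omega)]
        rw [hm, maskT, if_neg hx, hxs]
        simp
    · rw [if_neg (by exact_mod_cast hi)]
      rw [List.drop_eq_nil_iff.mpr (by omega), maskT]
      simp

-- skipping a star-free prefix of the mask copies the matching original chars
theorem tailBuild_append (m₁ m t₁ t : List Char) (hs : '*' ∉ m₁)
    (hl : m₁.length = t₁.length) :
    tailBuild (m₁ ++ m) (t₁ ++ t) = t₁ ++ tailBuild m t := by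
  induction m₁ generalizing t₁ with
  | nil =>
    have : t₁ = [] := by simpa using List.length_eq_zero_iff.mp hl.symm
    subst this; simp
  | cons c m₁ ih =>
    have hc : c ≠ '*' := fun h => hs (h ▸ List.mem_cons_self)
    have hs' : '*' ∉ m₁ := fun h => hs (List.mem_cons_of_mem _ h)
    cases t₁ with
    | nil => simp at hl
    | cons y t₁ =>
      rw [List.cons_append, List.cons_append, tailBuild, if_neg hc]
      simp only [List.take_cons, List.drop_succ_cons, List.drop_zero]
      rw [ih t₁ hs' (by simpa using hl)]
      simp [List.take_zero]

-- A's second loop computes tailBuild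
theorem tailBuild_nostar (m t : List Char) (hs : '*' ∉ m) (hl : t.length ≤ m.length) :
    tailBuild m t = t ++ [')'] := by
  induction m generalizing t with
  | nil =>
    have : t = [] := List.length_eq_zero_iff.mp (by simpa using hl)
    subst this; rfl
  | cons c m ih =>
    have hc : c ≠ '*' := fun h => hs (h ▸ List.mem_cons_self)
    have hs' : '*' ∉ m := fun h => hs (List.mem_cons_of_mem _ h)
    rw [tailBuild, if_neg hc]
    cases t with
    | nil => simpa using ih [] hs' (by simp)
    | cons y t =>
      simp only [List.take_cons, List.drop_succ_cons, List.drop_zero, List.take_zero]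
      rw [ih t hs' (by simp at hl ⊢; omega)]
      simp

theorem buildLoop_eq (fuel : Nat) (s masked : List Char) (i : Nat) (acc : List Char)
    (hlen : masked.length = s.length) (hi : i ≤ s.length)
    (hf : (masked.drop i).count '*' < fuel) :
    buildLoop s masked (i : Int) acc fuel = acc ++ tailBuild (masked.drop i) (s.drop i) := by
  induction fuel generalizing i acc with
  | zero => omega
  | succ f ih =>
    rw [buildLoop]
    have hff : PySem.Chars.findFrom masked ['*'] (i : Int) =
        if PySem.Chars.find (masked.drop i) ['*'] = -1 then -1
        else (i : Int) + PySem.Chars.find (masked.drop i) ['*'] :=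
      PySem.Chars.findFrom_natCast masked ['*'] i (by omega)
    cases hsi : starIdx? (masked.drop i) with
    | none =>
      have hfind : PySem.Chars.find (masked.drop i) ['*'] = -1 := by
        rw [find_star, hsi]
      have hmul : PySem.Chars.findFrom masked ['*'] (i : Int) = -1 := by
        rw [hff, if_pos hfind]
      rw [hmul]
      simp only [ne_eq, not_true_eq_false, if_false]
      rw [PySem.List.slice_from_natCast]
      rw [tailBuild_nostar _ _ (starIdx?_none _ hsi) (by simp; omega)]
      simp
    | some j =>
      have hfind : PySem.Chars.find (masked.drop i) ['*'] = (j : Int) := by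
        rw [find_star, hsi]
      obtain ⟨hjlt, hjtake, hjdrop⟩ := starIdx?_some _ _ hsi
      have hmi : (masked.drop i).length = s.length - i := by simp [hlen]
      have hmul : PySem.Chars.findFrom masked ['*'] (i : Int) = ((i + j : Nat) : Int) := by
        rw [hff, if_neg (by rw [hfind]; omega), hfind]
        push_cast; ring
      rw [hmul, if_pos (by omega : ¬ (((i + j : Nat) : Int) = -1))]
      have hslice : PySem.List.slice s (some (i : Int)) (some ((i + j : Nat) : Int)) =
          (s.drop i).take j := by
        have h2 := PySem.List.slice_natCast_add s i j
        rw [show ((i : Int) + (j : Int)) = ((i + j : Nat) : Int) by push_cast; ring] at h2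
        exact h2
      rw [hslice]
      rw [show ((i + j : Nat) : Int) + 1 = ((i + j + 1 : Nat) : Int) by push_cast; ring]
      -- facts about drops
      have hddm : masked.drop (i + j + 1) = (masked.drop i).drop (j + 1) := by
        rw [List.drop_drop]; congr 1
      have hdds : s.drop (i + j + 1) = (s.drop i).drop (j + 1) := by
        rw [List.drop_drop]; congr 1
      have hcount : ((masked.drop i).drop (j+1)).count '*' < f := by
        have h1 : ((masked.drop i).take j).count '*' = 0 := List.count_eq_zero.mpr hjtake
        have h2 : (masked.drop i).count '*' =
            ((masked.drop i).take j).count '*' + ('*' :: (masked.drop i).drop (j+1)).count '*' := by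
          conv_lhs => rw [← List.take_append_drop j (masked.drop i), hjdrop]
          rw [List.count_append]
        have h3 : ('*' :: (masked.drop i).drop (j+1)).count '*' =
            ((masked.drop i).drop (j+1)).count '*' + 1 := List.count_cons_self
        omega
      rw [ih (i + j + 1) _ (by omega) (by rw [hddm]; exact hcount)]
      -- rewrite the RHS tailBuild by splitting at the star
      have hsplit : masked.drop i = (masked.drop i).take j ++ '*' :: (masked.drop i).drop (j+1) := by
        conv_lhs => rw [← List.take_append_drop j (masked.drop i)]
        rw [hjdrop]
      have htsplit : s.drop i = (s.drop i).take j ++ (s.drop i).drop j := by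
        rw [List.take_append_drop]
      have hlent : ((masked.drop i).take j).length = ((s.drop i).take j).length := by
        simp [hlen]
      conv_rhs => rw [hsplit, htsplit]
      rw [tailBuild_append _ _ _ _ (fun h => hjtake h) hlent]
      rw [tailBuild, if_pos rfl]
      have hd1 : ((s.drop i).drop j).drop 1 = (s.drop i).drop (j+1) := by
        rw [List.drop_drop]
      rw [hd1, hddm, hdds]
      simp

theorem maskT_length (cs : List Char) (h : cs.foldl clampStep 0 = 0) :
    (maskT cs).length = cs.length := by
  induction cs using maskT.induct with
  | case1 => simp [maskT]
  | case2 cs k hk ih =>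
    have hklt := closeIdx?_lt 1 cs k hk
    have hbal' : (cs.drop (k+1)).foldl clampStep 0 = 0 := by
      rw [← closeIdx?_bal 1 cs k le_rfl hk]
      simpa [List.foldl_cons, clampStep] using h
    rw [maskT, if_pos rfl, hk]
    simp [ih hbal']
    omega
  | case3 cs hk =>
    exfalso
    have h1 : List.foldl clampStep 1 cs = 0 := by
      simpa [List.foldl_cons, clampStep] using h
    have := closeIdx?_none_pos 1 cs le_rfl hk
    omega
  | case4 c cs hc ih =>
    rw [maskT, if_neg hc]
    have hbal' : cs.foldl clampStep 0 = 0 := by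
      have hstep : clampStep 0 c = 0 := by simp [clampStep, hc]
      simpa [List.foldl_cons, hstep] using h
    simp [ih hbal']

theorem join_consHead (sep p : List Char) (x : List Char) (xs : List (List Char)) :
    PySem.Chars.join sep (consHead p (x :: xs)) = p ++ PySem.Chars.join sep (x :: xs) := by
  cases xs with
  | nil => simp [consHead, PySem.Chars.join_singleton]
  | cons y ys =>
    simp only [consHead]
    rw [PySem.Chars.join_cons_cons, PySem.Chars.join_cons_cons]
    simp

theorem consHead_length (p : List Char) (l : List (List Char)) (h : l ≠ []) :
    (consHead p l).length = l.length := by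
  cases l with
  | nil => exact absurd rfl h
  | cons x xs => simp [consHead]

theorem tailBuild_maskT (cs : List Char) :
    tailBuild (maskT cs) cs = PySem.Chars.join [')', '*', '('] (segsG cs) ++ [')'] := by
  induction cs using segsG.induct with
  | case1 => simp [maskT, segsG, tailBuild, PySem.Chars.join_singleton]
  | case2 cs ih =>
    have hmt : maskT ('*' :: cs) = '*' :: maskT cs := by
      rw [maskT, if_neg (by decide)]
    rw [hmt, tailBuild, if_pos rfl, segsG, if_pos rfl]
    simp only [List.drop_succ_cons, List.drop_zero]
    rw [ih]
    cases hsg : segsG cs with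
    | nil => exact absurd hsg (segsG_ne_nil cs)
    | cons x xs =>
      rw [PySem.Chars.join_cons_cons]
      simp
  | case3 cs k hk hne ih =>
    have hklt := closeIdx?_lt 1 cs k hk
    rw [segsG, if_neg (by simp), if_pos rfl]
    simp only [hk]
    rw [maskT, if_pos rfl, hk]
    have hsplit : '(' :: cs = ('(' :: cs.take (k+1)) ++ cs.drop (k+1) := by
      simp
    conv_lhs => rw [hsplit]
    rw [tailBuild_append _ _ _ _ (by simp) (by simp; omega)]
    rw [ih]
    cases hsg : segsG (cs.drop (k+1)) with
    | nil => exact absurd hsg (segsG_ne_nil _)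
    | cons x xs =>
      rw [join_consHead]
      simp
  | case4 cs hk hne =>
    rw [maskT, if_pos rfl, hk]
    rw [tailBuild_nostar _ _ (by simp) (by simp)]
    rw [segsG, if_neg (by simp), if_pos rfl, hk]
    simp [PySem.Chars.join_singleton]
  | case5 c cs h1 h2 ih =>
    have hmt : maskT (c :: cs) = c :: maskT cs := by
      rw [maskT, if_neg h2]
    rw [hmt, tailBuild, if_neg h1]
    simp only [List.take_succ_cons, List.take_zero, List.drop_succ_cons, List.drop_zero]
    rw [ih]
    rw [segsG, if_neg h1, if_neg h2]
    cases hsg : segsG cs with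
    | nil => exact absurd hsg (segsG_ne_nil cs)
    | cons x xs =>
      rw [join_consHead]
      simp

theorem star_maskT (cs : List Char) : '*' ∈ maskT cs ↔ 2 ≤ (segsG cs).length := by
  induction cs using segsG.induct with
  | case1 => simp [maskT, segsG]
  | case2 cs ih =>
    have hmt : maskT ('*' :: cs) = '*' :: maskT cs := by
      rw [maskT, if_neg (by decide)]
    have hlen : 1 ≤ (segsG cs).length :=
      List.length_pos_iff.mpr (segsG_ne_nil cs)
    rw [hmt, segsG, if_pos rfl]
    simp
    omega
  | case3 cs k hk hne ih =>
    rw [maskT, if_pos rfl, hk, segsG, if_neg (by simp), if_pos rfl, hk]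
    rw [consHead_length _ _ (segsG_ne_nil _)]
    simp only [List.mem_append, List.mem_replicate]
    constructor
    · rintro (⟨-, h⟩ | h)
      · exact absurd h.symm (by decide)
      · exact ih.mp h
    · intro h
      exact Or.inr (ih.mpr h)
  | case4 cs hk hne =>
    rw [maskT, if_pos rfl, hk, segsG, if_neg (by simp), if_pos rfl, hk]
    simp [List.mem_replicate]
  | case5 c cs h1 h2 ih =>
    have hmt : maskT (c :: cs) = c :: maskT cs := by
      rw [maskT, if_neg h2]
    rw [hmt, segsG, if_neg h1, if_neg h2]
    rw [consHead_length _ _ (segsG_ne_nil _)]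
    simp [Ne.symm h1]
    exact ih

-- ===== VERDICT (by name: the statement is the Claim_ definition above) =====
theorem preprocessClosure_spec : Claim_equal_preprocessClosure := by
  intro substr _ hpre
  unfold Pre_preprocessClosure at hpre
  unfold Spec_preprocessClosure preprocessClosure preprocessClosure_alt
  simp only []
  have hmask : maskLoop substr.toList 0 [] (substr.toList.length + 1) = maskT substr.toList := by
    have h := maskLoop_eq (substr.toList.length + 1) substr.toList 0 [] (by simpa using hpre)
      (by simp)
    simpa using h
  rw [hmask]
  have hlenm := maskT_length substr.toList hpre
  have hsegs : segLoop substr.toList 0 [] [] = segsG substr.toList := by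
    rw [segLoop_eq]
    simp only [List.nil_append]
    rw [consHead_nil_of_ne _ (segsR_ne_nil _ _), segsR_eq_segsG]
  rw [hsegs]
  have hff : PySem.Chars.findFrom (maskT substr.toList) ['*'] 0 =
      if PySem.Chars.find (maskT substr.toList) ['*'] = -1 then -1
      else PySem.Chars.find (maskT substr.toList) ['*'] := by
    have h := PySem.Chars.findFrom_natCast (maskT substr.toList) ['*'] 0 (Nat.zero_le _)
    simpa using h
  have hlen1 : 1 ≤ (segsG substr.toList).length :=
    List.length_pos_iff.mpr (segsG_ne_nil substr.toList)
  cases hsi : starIdx? (maskT substr.toList) with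
  | none =>
    have hfind : PySem.Chars.find (maskT substr.toList) ['*'] = -1 := by
      rw [find_star, hsi]
    rw [hff, if_pos hfind]
    have hnostar := starIdx?_none _ hsi
    have h2 : ¬ 2 ≤ (segsG substr.toList).length := fun h => hnostar ((star_maskT _).mpr h)
    rw [if_pos rfl, if_pos (show (segsG substr.toList).length = 1 by omega)]
  | some j =>
    have hfind : PySem.Chars.find (maskT substr.toList) ['*'] = (j : Int) := by
      rw [find_star, hsi]
    obtain ⟨hjlt, hjtake, hjdrop⟩ := starIdx?_some _ _ hsi
    have hstar : '*' ∈ maskT substr.toList :=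
      List.mem_of_mem_drop (hjdrop ▸ List.mem_cons_self)
    have h2 : 2 ≤ (segsG substr.toList).length := (star_maskT _).mp hstar
    rw [hff, if_neg (by rw [hfind]; omega)]
    rw [if_neg (show ¬ (segsG substr.toList).length = 1 by omega)]
    have hbuild : buildLoop substr.toList (maskT substr.toList) 0 ['(']
        (substr.toList.length + 2) =
        ['('] ++ tailBuild (maskT substr.toList) substr.toList := by
      have h := buildLoop_eq (substr.toList.length + 2) substr.toList (maskT substr.toList) 0
        ['('] hlenm (Nat.zero_le _)
        (by
          have hc : (maskT substr.toList).count '*' ≤ (maskT substr.toList).length :=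
            List.count_le_length
          simp only [List.drop_zero]
          omega)
      simpa using h
    rw [hbuild, tailBuild_maskT]
    rfl
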